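-- pv_equiv track=rewrite | github.com/Haruk1y/test_lip | utils/metrics.py | _convert_to_moras
-- ===== SOURCE A (Python) =====
-- from typing import List, Tuple
--
-- def _convert_to_moras(phoneme_seq: str) -> List[str]:
--     """
--     音素列をモーラ列に変換
--
--     Args:
--         phoneme_seq: 音素列
--
--     Returns:
--         List[str]: モーラ列
--     """
--     # 特殊トークンの処理
--     special_tokens = {'sil', 'sp', 'silB', 'silE', 'pau'}
--     if phoneme_seq in special_tokens:
--         return [phoneme_seq]
--
--     # 音素の組み合わせルール
--     mora_rules = {
--         # 長音
--         'a': {'a': 'aa'},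
--         'i': {'i': 'ii'},
--         'u': {'u': 'uu'},
--         'e': {'e': 'ee'},
--         'o': {'o': 'oo'},
--
--         # 撥音
--         'N': {'': 'N'},
--
--         # 促音
--         'q': {'': 'q'},
--
--         # 拗音
--         'y': {'a': 'ya', 'u': 'yu', 'o': 'yo'},
--
--         # 特殊な音素の組み合わせ
--         'ch': {'a': 'cha', 'i': 'chi', 'u': 'chu', 'e': 'che', 'o': 'cho'},
--         'sh': {'a': 'sha', 'i': 'shi', 'u': 'shu', 'e': 'she', 'o': 'sho'},
--         'ts': {'u': 'tsu'},
--     }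
--
--     moras = []
--     i = 0
--     while i < len(phoneme_seq):
--         current_mora = ""
--
--         # 2文字の特殊な組み合わせをチェック
--         if i + 1 < len(phoneme_seq) and phoneme_seq[i:i+2] in {'ch', 'sh', 'ts'}:
--             if i + 2 < len(phoneme_seq) and phoneme_seq[i+2] in mora_rules[phoneme_seq[i:i+2]]:
--                 current_mora = mora_rules[phoneme_seq[i:i+2]][phoneme_seq[i+2]]
--                 i += 3
--             else:
--                 current_mora = phoneme_seq[i]
--                 i += 1
--         # 拗音をチェック
--         elif i + 1 < len(phoneme_seq) and phoneme_seq[i] in mora_rules and \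
--              phoneme_seq[i+1] in mora_rules[phoneme_seq[i]]:
--             current_mora = mora_rules[phoneme_seq[i]][phoneme_seq[i+1]]
--             i += 2
--         # 単一の音素
--         else:
--             current_mora = phoneme_seq[i]
--             i += 1
--
--         moras.append(current_mora)
--
--     return moras
-- ===== SOURCE B (Python) =====
-- import re
-- from typing import List
--
-- _SPECIAL = {'sil', 'sp', 'silB', 'silE', 'pau'}
-- _MORA_RE = re.compile(
--     r'(?:cha|chi|chu|che|cho|sha|shi|shu|she|sho|tsu'
--     r'|aa|ii|uu|ee|oo|ya|yu|yo'
--     r'|[\s\S])'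
-- )
--
-- def _convert_to_moras(phoneme_seq: str) -> List[str]:
--     if phoneme_seq in _SPECIAL:
--         return [phoneme_seq]
--     return _MORA_RE.findall(phoneme_seq)
-- ===== Notes on version B (the rewrite author's own statement) =====
-- stated objective: idiomatic
-- what changed: Replaces the hand-written index loop with nested rule dictionaries by a single regex findall whose longest-first alternation (eleven 3-char moras, eight 2-char moras, then a [\s\S] catch-all) tokenises the string in one library call.
import Mathlib
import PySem

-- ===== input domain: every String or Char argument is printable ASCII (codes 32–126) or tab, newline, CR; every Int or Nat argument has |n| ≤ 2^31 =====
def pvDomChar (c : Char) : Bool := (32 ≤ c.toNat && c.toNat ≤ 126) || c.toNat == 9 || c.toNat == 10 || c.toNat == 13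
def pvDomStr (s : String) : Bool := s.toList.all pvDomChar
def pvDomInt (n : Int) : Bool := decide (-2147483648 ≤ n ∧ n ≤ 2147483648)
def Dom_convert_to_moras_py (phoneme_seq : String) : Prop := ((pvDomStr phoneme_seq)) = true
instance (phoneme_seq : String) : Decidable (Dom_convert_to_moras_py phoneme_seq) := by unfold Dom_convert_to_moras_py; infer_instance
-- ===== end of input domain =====

-- B replaces A's hand-rolled dict-rule scanner by one regex findall with longest-first
-- alternation (idiomatic); equivalence of the return values is proved below.

-- ===== PORT A =====
-- mora_rules[p][c3] for the two-char prefixes p = 'ch'/'sh'/'ts' (branch 1 of A's loop)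
def pvRuleCh (c1 c2 c3 : Char) : Option String :=
  if c1 = 'c' ∧ c2 = 'h' then
    if c3 = 'a' then some "cha" else if c3 = 'i' then some "chi"
    else if c3 = 'u' then some "chu" else if c3 = 'e' then some "che"
    else if c3 = 'o' then some "cho" else none
  else if c1 = 's' ∧ c2 = 'h' then
    if c3 = 'a' then some "sha" else if c3 = 'i' then some "shi"
    else if c3 = 'u' then some "shu" else if c3 = 'e' then some "she"
    else if c3 = 'o' then some "sho" else none
  else -- here c1c2 = "ts"
    if c3 = 'u' then some "tsu" else none

-- mora_rules[c1].get(c2) for a single-char key c1 (branch 2 of A's loop).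
-- The 'N' and 'q' rules map only the key '' which a one-character c2 never equals, so none.
def pvRule1 (c1 c2 : Char) : Option String :=
  if c1 = 'a' then (if c2 = 'a' then some "aa" else none)
  else if c1 = 'i' then (if c2 = 'i' then some "ii" else none)
  else if c1 = 'u' then (if c2 = 'u' then some "uu" else none)
  else if c1 = 'e' then (if c2 = 'e' then some "ee" else none)
  else if c1 = 'o' then (if c2 = 'o' then some "oo" else none)
  else if c1 = 'N' then none
  else if c1 = 'q' then none
  else if c1 = 'y' then
    (if c2 = 'a' then some "ya" else if c2 = 'u' then some "yu"
     else if c2 = 'o' then some "yo" else none)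
  else none

-- the while-loop of A, index i replaced by the remaining suffix of the char list;
-- the patterns encode A's "i+1 < len" / "i+2 < len" guards on the suffix shape
def pvALoop : List Char → List String
  | [] => []
  | [c1] => [String.ofList [c1]]
  | [c1, c2] =>
    if (c1 = 'c' ∧ c2 = 'h') ∨ (c1 = 's' ∧ c2 = 'h') ∨ (c1 = 't' ∧ c2 = 's') then
      String.ofList [c1] :: pvALoop [c2]
    else
      match pvRule1 c1 c2 with
      | some m => m :: pvALoop []
      | none => String.ofList [c1] :: pvALoop [c2]
  | c1 :: c2 :: c3 :: tail3 =>
    if (c1 = 'c' ∧ c2 = 'h') ∨ (c1 = 's' ∧ c2 = 'h') ∨ (c1 = 't' ∧ c2 = 's') then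
      match pvRuleCh c1 c2 c3 with
      | some m => m :: pvALoop tail3
      | none => String.ofList [c1] :: pvALoop (c2 :: c3 :: tail3)
    else
      match pvRule1 c1 c2 with
      | some m => m :: pvALoop (c3 :: tail3)
      | none => String.ofList [c1] :: pvALoop (c2 :: c3 :: tail3)
termination_by cs => cs.length
decreasing_by all_goals (simp; try omega)

def convert_to_moras_py (phoneme_seq : String) : List String :=
  if phoneme_seq = "sil" ∨ phoneme_seq = "sp" ∨ phoneme_seq = "silB"
     ∨ phoneme_seq = "silE" ∨ phoneme_seq = "pau" then [phoneme_seq]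
  else pvALoop phoneme_seq.toList

-- ===== PORT B =====
-- the regex alternation, in B's order (longest-first, then the catch-all single char below)
def pvAlts : List String :=
  ["cha", "chi", "chu", "che", "cho", "sha", "shi", "shu", "she", "sho", "tsu",
   "aa", "ii", "uu", "ee", "oo", "ya", "yu", "yo"]

-- re.findall of B's pattern: at each position the first listed alternative that
-- matches is taken, else the catch-all [\s\S] consumes one character
def pvBLoop : List Char → List String
  | [] => []
  | c :: rest =>
    match pvAlts.find? (fun t => t.toList.isPrefixOf (c :: rest)) with
    | some t => t :: pvBLoop (List.drop (t.toList.length - 1) rest)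
    | none => String.ofList [c] :: pvBLoop rest
termination_by cs => cs.length
decreasing_by all_goals (simp [List.length_drop]; try omega)

def convert_to_moras_py_alt (phoneme_seq : String) : List String :=
  if phoneme_seq = "sil" ∨ phoneme_seq = "sp" ∨ phoneme_seq = "silB"
     ∨ phoneme_seq = "silE" ∨ phoneme_seq = "pau" then [phoneme_seq]
  else pvBLoop phoneme_seq.toList

-- ===== PRECONDITION & SPEC =====
def Spec_convert_to_moras_py (phoneme_seq : String) (out : List String) : Prop := out = convert_to_moras_py_alt phoneme_seq
instance (phoneme_seq : String) (out : List String) : Decidable (Spec_convert_to_moras_py phoneme_seq out) := by unfold Spec_convert_to_moras_py; infer_instance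

-- ===== CLAIM (what is proved, stated in full; the proofs are below) =====
def Claim_equal_convert_to_moras_py : Prop := ∀ (phoneme_seq : String), Dom_convert_to_moras_py phoneme_seq → Spec_convert_to_moras_py phoneme_seq (convert_to_moras_py phoneme_seq)

-- ===== LEMMAS AND PROOFS =====

lemma pvB_cons (c : Char) (rest : List Char) :
    pvBLoop (c :: rest) =
      match pvAlts.find? (fun t => t.toList.isPrefixOf (c :: rest)) with
      | some t => t :: pvBLoop (List.drop (t.toList.length - 1) rest)
      | none => String.ofList [c] :: pvBLoop rest := by
  simp only [pvBLoop]

lemma loop_eq : ∀ n cs, List.length cs ≤ n → pvALoop cs = pvBLoop cs := by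
  intro n
  induction n with
  | zero =>
    intro cs h
    have : cs = [] := List.eq_nil_of_length_eq_zero (Nat.le_zero.mp h)
    subst this; simp [pvALoop, pvBLoop]
  | succ n ih =>
    intro cs h
    match cs with
    | [] => simp [pvALoop, pvBLoop]
    | [c1] =>
      simp [pvALoop, pvBLoop, pvAlts, List.find?, List.isPrefixOf]
    | [c1, c2] =>
      have ih1 := ih [c2] (by simp at h ⊢; omega)
      have ih0 := ih [] (by simp)
      by_cases ec : c1 = 'c'
      · subst ec
        by_cases fc : c2 = 'h'
        · subst fc
          rw [pvB_cons]
          simp [pvALoop, pvRule1, pvRuleCh, pvAlts, List.find?, List.isPrefixOf, ih1]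
        · rw [pvB_cons]
          simp [pvALoop, pvRule1, pvRuleCh, pvAlts, List.find?, List.isPrefixOf, fc, beq_eq_false_iff_ne.mpr (Ne.symm fc), ih1]
      by_cases es : c1 = 's'
      · subst es
        by_cases fs : c2 = 'h'
        · subst fs
          rw [pvB_cons]
          simp [pvALoop, pvRule1, pvRuleCh, pvAlts, List.find?, List.isPrefixOf, ih1]
        · rw [pvB_cons]
          simp [pvALoop, pvRule1, pvRuleCh, pvAlts, List.find?, List.isPrefixOf, fs, beq_eq_false_iff_ne.mpr (Ne.symm fs), ih1]
      by_cases et : c1 = 't'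
      · subst et
        by_cases ft : c2 = 's'
        · subst ft
          rw [pvB_cons]
          simp [pvALoop, pvRule1, pvRuleCh, pvAlts, List.find?, List.isPrefixOf, ih1]
        · rw [pvB_cons]
          simp [pvALoop, pvRule1, pvRuleCh, pvAlts, List.find?, List.isPrefixOf, ft, beq_eq_false_iff_ne.mpr (Ne.symm ft), ih1]
      by_cases ea : c1 = 'a'
      · subst ea
        by_cases ga : c2 = 'a'
        · subst ga
          rw [pvB_cons]
          simp [pvALoop, pvRule1, pvRuleCh, pvAlts, List.find?, List.isPrefixOf, ih0]
        rw [pvB_cons]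
        simp [pvALoop, pvRule1, pvRuleCh, pvAlts, List.find?, List.isPrefixOf, ga, beq_eq_false_iff_ne.mpr (Ne.symm ga), ih1]
      by_cases ei : c1 = 'i'
      · subst ei
        by_cases gi : c2 = 'i'
        · subst gi
          rw [pvB_cons]
          simp [pvALoop, pvRule1, pvRuleCh, pvAlts, List.find?, List.isPrefixOf, ih0]
        rw [pvB_cons]
        simp [pvALoop, pvRule1, pvRuleCh, pvAlts, List.find?, List.isPrefixOf, gi, beq_eq_false_iff_ne.mpr (Ne.symm gi), ih1]
      by_cases eu : c1 = 'u'
      · subst eu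
        by_cases gu : c2 = 'u'
        · subst gu
          rw [pvB_cons]
          simp [pvALoop, pvRule1, pvRuleCh, pvAlts, List.find?, List.isPrefixOf, ih0]
        rw [pvB_cons]
        simp [pvALoop, pvRule1, pvRuleCh, pvAlts, List.find?, List.isPrefixOf, gu, beq_eq_false_iff_ne.mpr (Ne.symm gu), ih1]
      by_cases ee : c1 = 'e'
      · subst ee
        by_cases ge : c2 = 'e'
        · subst ge
          rw [pvB_cons]
          simp [pvALoop, pvRule1, pvRuleCh, pvAlts, List.find?, List.isPrefixOf, ih0]
        rw [pvB_cons]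
        simp [pvALoop, pvRule1, pvRuleCh, pvAlts, List.find?, List.isPrefixOf, ge, beq_eq_false_iff_ne.mpr (Ne.symm ge), ih1]
      by_cases eo : c1 = 'o'
      · subst eo
        by_cases go : c2 = 'o'
        · subst go
          rw [pvB_cons]
          simp [pvALoop, pvRule1, pvRuleCh, pvAlts, List.find?, List.isPrefixOf, ih0]
        rw [pvB_cons]
        simp [pvALoop, pvRule1, pvRuleCh, pvAlts, List.find?, List.isPrefixOf, go, beq_eq_false_iff_ne.mpr (Ne.symm go), ih1]
      by_cases ey : c1 = 'y'
      · subst ey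
        by_cases ga : c2 = 'a'
        · subst ga
          rw [pvB_cons]
          simp [pvALoop, pvRule1, pvRuleCh, pvAlts, List.find?, List.isPrefixOf, ih0]
        by_cases gu : c2 = 'u'
        · subst gu
          rw [pvB_cons]
          simp [pvALoop, pvRule1, pvRuleCh, pvAlts, List.find?, List.isPrefixOf, ih0]
        by_cases go : c2 = 'o'
        · subst go
          rw [pvB_cons]
          simp [pvALoop, pvRule1, pvRuleCh, pvAlts, List.find?, List.isPrefixOf, ih0]
        rw [pvB_cons]
        simp [pvALoop, pvRule1, pvRuleCh, pvAlts, List.find?, List.isPrefixOf, ga, beq_eq_false_iff_ne.mpr (Ne.symm ga), gu, beq_eq_false_iff_ne.mpr (Ne.symm gu), go, beq_eq_false_iff_ne.mpr (Ne.symm go), ih1]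
      by_cases eN : c1 = 'N'
      · subst eN
        rw [pvB_cons]
        simp [pvALoop, pvRule1, pvRuleCh, pvAlts, List.find?, List.isPrefixOf, ih1]
      by_cases eq : c1 = 'q'
      · subst eq
        rw [pvB_cons]
        simp [pvALoop, pvRule1, pvRuleCh, pvAlts, List.find?, List.isPrefixOf, ih1]
      rw [pvB_cons]
      simp [pvALoop, pvRule1, pvRuleCh, pvAlts, List.find?, List.isPrefixOf, ec, beq_eq_false_iff_ne.mpr (Ne.symm ec), es, beq_eq_false_iff_ne.mpr (Ne.symm es), et, beq_eq_false_iff_ne.mpr (Ne.symm et), ea, beq_eq_false_iff_ne.mpr (Ne.symm ea), ei, beq_eq_false_iff_ne.mpr (Ne.symm ei), eu, beq_eq_false_iff_ne.mpr (Ne.symm eu), ee, beq_eq_false_iff_ne.mpr (Ne.symm ee), eo, beq_eq_false_iff_ne.mpr (Ne.symm eo), ey, beq_eq_false_iff_ne.mpr (Ne.symm ey), ih1]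
    | c1 :: c2 :: c3 :: rest =>
      have hlen : rest.length + 3 ≤ n + 1 := by simpa using h
      have ih3 := ih rest (by omega)
      have ih2 := ih (c3 :: rest) (by simp; omega)
      have ih1 := ih (c2 :: c3 :: rest) (by simp; omega)
      by_cases ec : c1 = 'c'
      · subst ec
        by_cases fc : c2 = 'h'
        · subst fc
          by_cases hva : c3 = 'a'
          · subst hva
            rw [pvB_cons]
            simp [pvALoop, pvRule1, pvRuleCh, pvAlts, List.find?, List.isPrefixOf, ih3]
          by_cases hvi : c3 = 'i'
          · subst hvi
            rw [pvB_cons]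
            simp [pvALoop, pvRule1, pvRuleCh, pvAlts, List.find?, List.isPrefixOf, ih3]
          by_cases hvu : c3 = 'u'
          · subst hvu
            rw [pvB_cons]
            simp [pvALoop, pvRule1, pvRuleCh, pvAlts, List.find?, List.isPrefixOf, ih3]
          by_cases hve : c3 = 'e'
          · subst hve
            rw [pvB_cons]
            simp [pvALoop, pvRule1, pvRuleCh, pvAlts, List.find?, List.isPrefixOf, ih3]
          by_cases hvo : c3 = 'o'
          · subst hvo
            rw [pvB_cons]
            simp [pvALoop, pvRule1, pvRuleCh, pvAlts, List.find?, List.isPrefixOf, ih3]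
          rw [pvB_cons]
          simp [pvALoop, pvRule1, pvRuleCh, pvAlts, List.find?, List.isPrefixOf, hva, beq_eq_false_iff_ne.mpr (Ne.symm hva), hvi, beq_eq_false_iff_ne.mpr (Ne.symm hvi), hvu, beq_eq_false_iff_ne.mpr (Ne.symm hvu), hve, beq_eq_false_iff_ne.mpr (Ne.symm hve), hvo, beq_eq_false_iff_ne.mpr (Ne.symm hvo), ih1]
        · rw [pvB_cons]
          simp [pvALoop, pvRule1, pvRuleCh, pvAlts, List.find?, List.isPrefixOf, fc, beq_eq_false_iff_ne.mpr (Ne.symm fc), ih1]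
      by_cases es : c1 = 's'
      · subst es
        by_cases fs : c2 = 'h'
        · subst fs
          by_cases hva : c3 = 'a'
          · subst hva
            rw [pvB_cons]
            simp [pvALoop, pvRule1, pvRuleCh, pvAlts, List.find?, List.isPrefixOf, ih3]
          by_cases hvi : c3 = 'i'
          · subst hvi
            rw [pvB_cons]
            simp [pvALoop, pvRule1, pvRuleCh, pvAlts, List.find?, List.isPrefixOf, ih3]
          by_cases hvu : c3 = 'u'
          · subst hvu
            rw [pvB_cons]
            simp [pvALoop, pvRule1, pvRuleCh, pvAlts, List.find?, List.isPrefixOf, ih3]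
          by_cases hve : c3 = 'e'
          · subst hve
            rw [pvB_cons]
            simp [pvALoop, pvRule1, pvRuleCh, pvAlts, List.find?, List.isPrefixOf, ih3]
          by_cases hvo : c3 = 'o'
          · subst hvo
            rw [pvB_cons]
            simp [pvALoop, pvRule1, pvRuleCh, pvAlts, List.find?, List.isPrefixOf, ih3]
          rw [pvB_cons]
          simp [pvALoop, pvRule1, pvRuleCh, pvAlts, List.find?, List.isPrefixOf, hva, beq_eq_false_iff_ne.mpr (Ne.symm hva), hvi, beq_eq_false_iff_ne.mpr (Ne.symm hvi), hvu, beq_eq_false_iff_ne.mpr (Ne.symm hvu), hve, beq_eq_false_iff_ne.mpr (Ne.symm hve), hvo, beq_eq_false_iff_ne.mpr (Ne.symm hvo), ih1]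
        · rw [pvB_cons]
          simp [pvALoop, pvRule1, pvRuleCh, pvAlts, List.find?, List.isPrefixOf, fs, beq_eq_false_iff_ne.mpr (Ne.symm fs), ih1]
      by_cases et : c1 = 't'
      · subst et
        by_cases ft : c2 = 's'
        · subst ft
          by_cases hvu : c3 = 'u'
          · subst hvu
            rw [pvB_cons]
            simp [pvALoop, pvRule1, pvRuleCh, pvAlts, List.find?, List.isPrefixOf, ih3]
          rw [pvB_cons]
          simp [pvALoop, pvRule1, pvRuleCh, pvAlts, List.find?, List.isPrefixOf, hvu, beq_eq_false_iff_ne.mpr (Ne.symm hvu), ih1]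
        · rw [pvB_cons]
          simp [pvALoop, pvRule1, pvRuleCh, pvAlts, List.find?, List.isPrefixOf, ft, beq_eq_false_iff_ne.mpr (Ne.symm ft), ih1]
      by_cases ea : c1 = 'a'
      · subst ea
        by_cases ga : c2 = 'a'
        · subst ga
          rw [pvB_cons]
          simp [pvALoop, pvRule1, pvRuleCh, pvAlts, List.find?, List.isPrefixOf, ih2]
        rw [pvB_cons]
        simp [pvALoop, pvRule1, pvRuleCh, pvAlts, List.find?, List.isPrefixOf, ga, beq_eq_false_iff_ne.mpr (Ne.symm ga), ih1]
      by_cases ei : c1 = 'i'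
      · subst ei
        by_cases gi : c2 = 'i'
        · subst gi
          rw [pvB_cons]
          simp [pvALoop, pvRule1, pvRuleCh, pvAlts, List.find?, List.isPrefixOf, ih2]
        rw [pvB_cons]
        simp [pvALoop, pvRule1, pvRuleCh, pvAlts, List.find?, List.isPrefixOf, gi, beq_eq_false_iff_ne.mpr (Ne.symm gi), ih1]
      by_cases eu : c1 = 'u'
      · subst eu
        by_cases gu : c2 = 'u'
        · subst gu
          rw [pvB_cons]
          simp [pvALoop, pvRule1, pvRuleCh, pvAlts, List.find?, List.isPrefixOf, ih2]
        rw [pvB_cons]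
        simp [pvALoop, pvRule1, pvRuleCh, pvAlts, List.find?, List.isPrefixOf, gu, beq_eq_false_iff_ne.mpr (Ne.symm gu), ih1]
      by_cases ee : c1 = 'e'
      · subst ee
        by_cases ge : c2 = 'e'
        · subst ge
          rw [pvB_cons]
          simp [pvALoop, pvRule1, pvRuleCh, pvAlts, List.find?, List.isPrefixOf, ih2]
        rw [pvB_cons]
        simp [pvALoop, pvRule1, pvRuleCh, pvAlts, List.find?, List.isPrefixOf, ge, beq_eq_false_iff_ne.mpr (Ne.symm ge), ih1]
      by_cases eo : c1 = 'o'
      · subst eo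
        by_cases go : c2 = 'o'
        · subst go
          rw [pvB_cons]
          simp [pvALoop, pvRule1, pvRuleCh, pvAlts, List.find?, List.isPrefixOf, ih2]
        rw [pvB_cons]
        simp [pvALoop, pvRule1, pvRuleCh, pvAlts, List.find?, List.isPrefixOf, go, beq_eq_false_iff_ne.mpr (Ne.symm go), ih1]
      by_cases ey : c1 = 'y'
      · subst ey
        by_cases ga : c2 = 'a'
        · subst ga
          rw [pvB_cons]
          simp [pvALoop, pvRule1, pvRuleCh, pvAlts, List.find?, List.isPrefixOf, ih2]
        by_cases gu : c2 = 'u'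
        · subst gu
          rw [pvB_cons]
          simp [pvALoop, pvRule1, pvRuleCh, pvAlts, List.find?, List.isPrefixOf, ih2]
        by_cases go : c2 = 'o'
        · subst go
          rw [pvB_cons]
          simp [pvALoop, pvRule1, pvRuleCh, pvAlts, List.find?, List.isPrefixOf, ih2]
        rw [pvB_cons]
        simp [pvALoop, pvRule1, pvRuleCh, pvAlts, List.find?, List.isPrefixOf, ga, beq_eq_false_iff_ne.mpr (Ne.symm ga), gu, beq_eq_false_iff_ne.mpr (Ne.symm gu), go, beq_eq_false_iff_ne.mpr (Ne.symm go), ih1]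
      by_cases eN : c1 = 'N'
      · subst eN
        rw [pvB_cons]
        simp [pvALoop, pvRule1, pvRuleCh, pvAlts, List.find?, List.isPrefixOf, ih1]
      by_cases eq : c1 = 'q'
      · subst eq
        rw [pvB_cons]
        simp [pvALoop, pvRule1, pvRuleCh, pvAlts, List.find?, List.isPrefixOf, ih1]
      rw [pvB_cons]
      simp [pvALoop, pvRule1, pvRuleCh, pvAlts, List.find?, List.isPrefixOf, ec, beq_eq_false_iff_ne.mpr (Ne.symm ec), es, beq_eq_false_iff_ne.mpr (Ne.symm es), et, beq_eq_false_iff_ne.mpr (Ne.symm et), ea, beq_eq_false_iff_ne.mpr (Ne.symm ea), ei, beq_eq_false_iff_ne.mpr (Ne.symm ei), eu, beq_eq_false_iff_ne.mpr (Ne.symm eu), ee, beq_eq_false_iff_ne.mpr (Ne.symm ee), eo, beq_eq_false_iff_ne.mpr (Ne.symm eo), ey, beq_eq_false_iff_ne.mpr (Ne.symm ey), eN, eq, ih1]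

-- ===== VERDICT (by name: the statement is the Claim_ definition above) =====
theorem convert_to_moras_py_spec : Claim_equal_convert_to_moras_py := by
  intro s _
  unfold Spec_convert_to_moras_py convert_to_moras_py convert_to_moras_py_alt
  split_ifs with h
  · rfl
  · exact loop_eq s.toList.length s.toList le_rfl
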